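-- pv_equiv track=rewrite | github.com/imamnurby/RecipeGen-IFTTT-RP | compute_metrics.py | get_ngrams_matches
-- ===== SOURCE A (Python) =====
-- import collections
--
-- def _get_ngrams(segment, max_order):
--   """Extracts all n-grams upto a given maximum order from an input segment.
--
--   Args:
--     segment: text segment from which n-grams will be extracted.
--     max_order: maximum length in tokens of the n-grams returned by this
--         methods.
--
--   Returns:
--     The Counter containing all n-grams upto max_order in segment
--     with a count of how many times each n-gram occurred.
--   """
--   ngram_counts = collections.Counter()
--   for order in range(1, max_order + 1):
--     for i in range(0, len(segment) - order + 1):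
--       ngram = tuple(segment[i:i+order])
--       ngram_counts[ngram] += 1
--   return ngram_counts
--
-- def get_ngrams_matches(reference_corpus, translation_corpus, config):
--     matches_by_order = [0] * config["max_order_ngrams"]
--     possible_matches_by_order = [0] * config["max_order_ngrams"]
--     reference_length = 0
--     translation_length = 0
--     for (references, translation) in zip(reference_corpus,
--                                        translation_corpus):
--         reference_length += min(len(r) for r in references)
--         translation_length += len(translation)
--
--         merged_ref_ngram_counts = collections.Counter()
--         for reference in references:
--             merged_ref_ngram_counts |= _get_ngrams(reference, config["max_order_ngrams"])
--         translation_ngram_counts = _get_ngrams(translation, config["max_order_ngrams"])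
--         overlap = translation_ngram_counts & merged_ref_ngram_counts
--         for ngram in overlap:
--             matches_by_order[len(ngram)-1] += overlap[ngram]
--         for order in range(1, config["max_order_ngrams"]+1):
--             possible_matches = len(translation) - order + 1
--             if possible_matches > 0:
--                 possible_matches_by_order[order-1] += possible_matches
--     return matches_by_order, possible_matches_by_order, reference_length, translation_length
-- ===== SOURCE B (Python) =====
-- def _order_ngrams(seq, order):
--   """All n-grams of exactly the given order, in position order."""
--   return [seq[i:i+order] for i in range(len(seq) - order + 1)]
--
-- def _clipped_matches(references, translation, order):
--   """Clipped n-gram matches of one order: for each distinct translation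
--   n-gram, min(its translation count, its max count in any reference)."""
--   t_grams = _order_ngrams(translation, order)
--   r_gram_lists = [_order_ngrams(r, order) for r in references]
--   total = 0
--   for i, g in enumerate(t_grams):
--     if g in t_grams[:i]:
--       continue
--     total += min(t_grams.count(g), max(rg.count(g) for rg in r_gram_lists))
--   return total
--
-- def get_ngrams_matches(reference_corpus, translation_corpus, config):
--     matches_by_order = [0] * config["max_order_ngrams"]
--     possible_matches_by_order = [0] * config["max_order_ngrams"]
--     reference_length = 0
--     translation_length = 0
--     for references, translation in zip(reference_corpus, translation_corpus):
--         reference_length += min(len(r) for r in references)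
--         translation_length += len(translation)
--         for order in range(1, config["max_order_ngrams"] + 1):
--             matches_by_order[order - 1] += _clipped_matches(references, translation, order)
--             possible_matches = len(translation) - order + 1
--             if possible_matches > 0:
--                 possible_matches_by_order[order - 1] += possible_matches
--     return matches_by_order, possible_matches_by_order, reference_length, translation_length
-- ===== Notes on version B (the rewrite author's own statement) =====
-- stated objective: alternative
-- what changed: Replaces the Counter machinery (multi-order n-gram Counters, '|' max-merge across references, '&' intersection, then re-bucketing overlap counts by n-gram length) by a dictionary-free per-order computation: for each order it builds the plain n-gram lists and sums, over each first occurrence of a translation n-gram, min(count in translation, max count in any reference), adding the total straight into matches_by_order[order-1].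
import Mathlib
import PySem

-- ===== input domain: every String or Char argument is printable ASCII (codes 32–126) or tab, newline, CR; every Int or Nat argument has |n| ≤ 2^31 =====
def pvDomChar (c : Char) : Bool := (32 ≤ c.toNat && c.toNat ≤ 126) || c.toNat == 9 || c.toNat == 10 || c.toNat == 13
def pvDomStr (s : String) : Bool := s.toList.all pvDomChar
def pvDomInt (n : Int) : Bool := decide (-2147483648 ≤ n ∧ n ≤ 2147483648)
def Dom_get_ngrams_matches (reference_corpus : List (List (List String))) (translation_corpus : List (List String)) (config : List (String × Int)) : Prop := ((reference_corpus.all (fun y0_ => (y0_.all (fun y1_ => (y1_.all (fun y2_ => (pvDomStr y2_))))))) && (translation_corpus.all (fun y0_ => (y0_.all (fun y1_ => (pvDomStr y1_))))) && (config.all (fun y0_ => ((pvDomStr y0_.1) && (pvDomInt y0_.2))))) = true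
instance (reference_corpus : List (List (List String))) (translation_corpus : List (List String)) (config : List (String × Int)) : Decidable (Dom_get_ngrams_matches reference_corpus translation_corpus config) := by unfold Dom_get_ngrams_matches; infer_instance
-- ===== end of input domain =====

-- B replaces A's multi-order Counter pipeline (| max-merge, & intersection, re-bucketing the
-- overlap by n-gram length) by a dictionary-free per-order scan summing clipped counts directly;
-- a different decomposition of the same computation ("alternative" objective).

-- ===== PORT A =====

-- _get_ngrams: Counter over all n-grams of order 1..max_order
def pyGetNgramsA (segment : List String) (max_order : Int) : PySem.Dict (List String) Int :=
  (PySem.List.pyRange 1 (max_order + 1) 1).foldl (fun d order =>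
    (PySem.List.pyRange 0 (PySem.List.len segment - order + 1) 1).foldl (fun d i =>
      let ngram := PySem.List.slice segment (some i) (some (i + order))
      d.insert ngram (d.getD ngram 0 + 1)) d) PySem.Dict.empty

-- Counter |= (CPython: for each item of other, overwrite when strictly bigger; counts here all positive)
def pyCounterOr (a b : PySem.Dict (List String) Int) : PySem.Dict (List String) Int :=
  b.items.foldl (fun d p => if p.2 > d.getD p.1 0 then d.insert p.1 p.2 else d) a

-- Counter & (CPython: iterate self's items, keep the min with other when positive)
def pyCounterAnd (a b : PySem.Dict (List String) Int) : PySem.Dict (List String) Int :=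
  a.items.foldl (fun d p =>
    let n := min p.2 (b.getD p.1 0)
    if n > 0 then d.insert p.1 n else d) PySem.Dict.empty

def get_ngrams_matches (reference_corpus : List (List (List String))) (translation_corpus : List (List String)) (config : List (String × Int)) : List Int × List Int × Int × Int :=
  let M := (PySem.Dict.mk config).getD "max_order_ngrams" 0
  (reference_corpus.zip translation_corpus).foldl (fun st p =>
    let references := p.1
    let translation := p.2
    let rlen := st.2.2.1 + (PySem.List.min? (references.map (fun r => PySem.List.len r)) (fun x => x)).getD 0
    let tlen := st.2.2.2 + PySem.List.len translation
    let merged := references.foldl (fun m r => pyCounterOr m (pyGetNgramsA r M)) PySem.Dict.empty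
    let overlap := pyCounterAnd (pyGetNgramsA translation M) merged
    let ms := overlap.items.foldl (fun ms q =>
        ms.set (q.1.length - 1) (ms.getD (q.1.length - 1) 0 + overlap.getD q.1 0)) st.1
    let ps := (PySem.List.pyRange 1 (M + 1) 1).foldl (fun ps order =>
        let pm := PySem.List.len translation - order + 1
        if pm > 0 then ps.set (order - 1).toNat (ps.getD (order - 1).toNat 0 + pm) else ps) st.2.1
    (ms, ps, rlen, tlen))
   (List.replicate M.toNat 0, List.replicate M.toNat 0, 0, 0)

-- ===== PORT B =====

-- _order_ngrams: the n-grams of exactly one order, in position order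
def pyOrderNgrams (seq : List String) (order : Int) : List (List String) :=
  (PySem.List.pyRange 0 (PySem.List.len seq - order + 1) 1).map
    (fun i => PySem.List.slice seq (some i) (some (i + order)))

-- _clipped_matches: per distinct translation n-gram, min(translation count, max reference count)
def pyClippedMatches (references : List (List String)) (translation : List String) (order : Int) : Int :=
  let t_grams := pyOrderNgrams translation order
  let r_gram_lists := references.map (fun r => pyOrderNgrams r order)
  t_grams.zipIdx.foldl (fun total p =>
    if p.1 ∈ PySem.List.slice t_grams none (some (p.2 : Int)) then total
    else total + min (PySem.List.count t_grams p.1 : Int)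
      ((PySem.List.max? (r_gram_lists.map (fun rg => (PySem.List.count rg p.1 : Int))) (fun x => x)).getD 0)) 0

def get_ngrams_matches_alt (reference_corpus : List (List (List String))) (translation_corpus : List (List String)) (config : List (String × Int)) : List Int × List Int × Int × Int :=
  let M := (PySem.Dict.mk config).getD "max_order_ngrams" 0
  (reference_corpus.zip translation_corpus).foldl (fun st p =>
    let references := p.1
    let translation := p.2
    let rlen := st.2.2.1 + (PySem.List.min? (references.map (fun r => PySem.List.len r)) (fun x => x)).getD 0
    let tlen := st.2.2.2 + PySem.List.len translation
    let mp := (PySem.List.pyRange 1 (M + 1) 1).foldl (fun mp order =>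
        (mp.1.set (order - 1).toNat (mp.1.getD (order - 1).toNat 0 + pyClippedMatches references translation order),
         let pm := PySem.List.len translation - order + 1
         if pm > 0 then mp.2.set (order - 1).toNat (mp.2.getD (order - 1).toNat 0 + pm) else mp.2))
      (st.1, st.2.1)
    (mp.1, mp.2, rlen, tlen))
   (List.replicate M.toNat 0, List.replicate M.toNat 0, 0, 0)

-- ===== PRECONDITION & SPEC =====
-- Pre_ excludes exactly the inputs where the Python A raises: a config without the
-- "max_order_ngrams" key (KeyError) and a zipped pair whose reference list is empty
-- (ValueError from min() over an empty sequence).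
def Pre_get_ngrams_matches (reference_corpus : List (List (List String))) (translation_corpus : List (List String)) (config : List (String × Int)) : Prop :=
  (PySem.Dict.mk config).contains "max_order_ngrams" = true ∧
  ∀ p ∈ reference_corpus.zip translation_corpus, p.1 ≠ []
instance (reference_corpus : List (List (List String))) (translation_corpus : List (List String)) (config : List (String × Int)) : Decidable (Pre_get_ngrams_matches reference_corpus translation_corpus config) := by unfold Pre_get_ngrams_matches; infer_instance

def pvWitness_get_ngrams_matches : List (List (List String)) × List (List String) × (List (String × Int)) :=
  ([[["the", "cat"], ["a", "cat"]]], [["the", "cat"]], [("max_order_ngrams", 2)])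

def Spec_get_ngrams_matches (reference_corpus : List (List (List String))) (translation_corpus : List (List String)) (config : List (String × Int)) (out : List Int × List Int × Int × Int) : Prop := out = get_ngrams_matches_alt reference_corpus translation_corpus config
instance (reference_corpus : List (List (List String))) (translation_corpus : List (List String)) (config : List (String × Int)) (out : List Int × List Int × Int × Int) : Decidable (Spec_get_ngrams_matches reference_corpus translation_corpus config out) := by unfold Spec_get_ngrams_matches; infer_instance

-- ===== CLAIM (what is proved, stated in full; the proofs are below) =====
def Claim_equal_get_ngrams_matches : Prop := ∀ (reference_corpus : List (List (List String))) (translation_corpus : List (List String)) (config : List (String × Int)), Dom_get_ngrams_matches reference_corpus translation_corpus config → Pre_get_ngrams_matches reference_corpus translation_corpus config → Spec_get_ngrams_matches reference_corpus translation_corpus config (get_ngrams_matches reference_corpus translation_corpus config)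

-- ===== LEMMAS AND PROOFS =====

-- all n-grams of all orders 1..M, in A's Counter-building order
def flatG (t : List String) (M : Int) : List (List String) :=
  (PySem.List.pyRange 1 (M + 1) 1).flatMap (fun k => pyOrderNgrams t k)

-- A's max-merged reference counter
def mergedA (references : List (List String)) (M : Int) : PySem.Dict (List String) Int :=
  references.foldl (fun m r => pyCounterOr m (pyGetNgramsA r M)) PySem.Dict.empty

lemma mergedA_def (references : List (List String)) (M : Int) :
    references.foldl (fun m r => pyCounterOr m (pyGetNgramsA r M)) PySem.Dict.empty
      = mergedA references M := rfl

lemma ngramsA_eq_counter (t : List String) (M : Int) :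
    pyGetNgramsA t M = PySem.Dict.counter (flatG t M) := by
  unfold pyGetNgramsA flatG pyOrderNgrams
  rw [← PySem.Dict.foldl_insert_getD_add_one_eq_counter]
  simp only [List.flatMap_def, List.foldl_flatten, List.foldl_map]

lemma mem_orderNgrams_length {g t : List String} {k : Int} (hk : 1 ≤ k)
    (hg : g ∈ pyOrderNgrams t k) : g.length = k.toNat := by
  unfold pyOrderNgrams at hg
  simp only [List.mem_map] at hg
  obtain ⟨i, hi, rfl⟩ := hg
  rw [PySem.List.mem_pyRange_one] at hi
  simp only [PySem.List.len_eq] at hi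
  rw [PySem.List.slice_toNat _ (by omega) (by omega)]
  simp only [List.length_take, List.length_drop]
  omega

lemma sum_map_single (l : List Int) (c : Int → Nat) (k : Int) (hk : k ∈ l) (hnd : l.Nodup)
    (h0 : ∀ j ∈ l, j ≠ k → c j = 0) : (l.map c).sum = c k := by
  induction l with
  | nil => cases hk
  | cons a l ih =>
    simp only [List.map_cons, List.sum_cons]
    rcases List.mem_cons.mp hk with rfl | hk'
    · have : ∀ j ∈ l, c j = 0 := fun j hj =>
        h0 j (List.mem_cons_of_mem _ hj) (fun h => (List.nodup_cons.mp hnd).1 (h ▸ hj))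
      have : (l.map c).sum = 0 := by
        apply List.sum_eq_zero; intro x hx
        obtain ⟨j, hj, rfl⟩ := List.mem_map.mp hx; exact this j hj
      omega
    · rw [h0 a (List.mem_cons_self) (fun h => (List.nodup_cons.mp hnd).1 (h ▸ hk'))]
      rw [ih hk' (List.nodup_cons.mp hnd).2 (fun j hj => h0 j (List.mem_cons_of_mem _ hj))]
      omega

lemma count_flatG {g t : List String} {k M : Int} (hk1 : 1 ≤ k) (hkM : k ≤ M)
    (hg : g.length = k.toNat) :
    List.count g (flatG t M) = List.count g (pyOrderNgrams t k) := by
  unfold flatG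
  rw [List.flatMap_def, List.count_flatten, List.map_map]
  rw [sum_map_single _ _ k]
  · rfl
  · rw [PySem.List.mem_pyRange_one]; omega
  · exact PySem.List.nodup_pyRange_one _ _
  · intro j hj hjk
    rw [PySem.List.mem_pyRange_one] at hj
    simp only [Function.comp]
    rw [List.count_eq_zero]
    intro hmem
    have := mem_orderNgrams_length hj.1 hmem
    omega

lemma ofList_flatMap_len (l : List Int) (f : Int → List (List String)) (φ : Int → Nat)
    (hnd : l.Nodup) (hinj : ∀ j ∈ l, ∀ k ∈ l, φ j = φ k → j = k)
    (hlen : ∀ j ∈ l, ∀ g ∈ f j, (g : List String).length = φ j) :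
    PySem.Set.ofList (l.flatMap f) = l.flatMap (fun k => PySem.Set.ofList (f k)) := by
  induction l using List.reverseRecOn with
  | nil => simp [PySem.Set.ofList_nil]
  | append_singleton l k ih =>
    rw [List.flatMap_append, List.flatMap_append]
    rw [PySem.Set.ofList_append, PySem.Set.update_eq_append_filter]
    have hnd' := (List.nodup_append.mp hnd).1
    rw [ih hnd' (fun j hj k' hk' => hinj j (by simp [hj]) k' (by simp [hk']))
         (fun j hj => hlen j (by simp [hj]))]
    congr 1
    · simp only [List.flatMap_cons, List.flatMap_nil, List.append_nil]
      apply List.filter_eq_self.mpr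
      intro y hy
      have hyk : y.length = φ k := hlen k (by simp) y ((PySem.Set.mem_ofList _ _).mp hy)
      simp only [Bool.not_eq_true', ← Bool.not_eq_true, PySem.Set.contains_iff]
      simp only [List.mem_flatMap, not_exists, not_and]
      rintro j hj hyj
      rw [PySem.Set.mem_ofList] at hyj
      have : y.length = φ j := hlen j (by simp [hj]) y hyj
      have hjk : j = k := hinj j (by simp [hj]) k (by simp) (by omega)
      subst hjk
      exact (List.disjoint_of_nodup_append hnd hj (by simp)).elim

lemma ofList_flatG (t : List String) (M : Int) :
    PySem.Set.ofList (flatG t M)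
      = (PySem.List.pyRange 1 (M + 1) 1).flatMap (fun k => PySem.Set.ofList (pyOrderNgrams t k)) := by
  unfold flatG
  apply ofList_flatMap_len _ _ Int.toNat (PySem.List.nodup_pyRange_one _ _)
  · intro j hj k hk h
    rw [PySem.List.mem_pyRange_one] at hj hk
    omega
  · intro j hj g hg
    rw [PySem.List.mem_pyRange_one] at hj
    exact mem_orderNgrams_length hj.1 hg

lemma foldl_maxinsert (s : List (List String)) (hs : s.Nodup) (c : List String → Int)
    (a : PySem.Dict (List String) Int) (g : List String) :
    ((s.foldl (fun d kk => if c kk > d.getD kk 0 then d.insert kk (c kk) else d) a).getD g 0)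
      = if g ∈ s then max (a.getD g 0) (c g) else a.getD g 0 := by
  induction s generalizing a with
  | nil => simp
  | cons h tl ih =>
    simp only [List.foldl_cons]
    obtain ⟨hh, htl⟩ := List.nodup_cons.mp hs
    rw [ih htl]
    have hstep : ∀ x : List String,
        ((if c h > a.getD h 0 then a.insert h (c h) else a).getD x 0)
          = if x = h then max (a.getD h 0) (c h) else a.getD x 0 := by
      intro x
      split_ifs with h1 h2 h2
      · rw [h2, PySem.Dict.getD_insert]; simp; omega
      · rw [PySem.Dict.getD_insert]; simp [h2]
      · rw [h2]; omega
      · rfl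
    by_cases hg : g ∈ tl
    · have hgh : g ≠ h := fun e => hh (e ▸ hg)
      simp [hg, hstep g, hgh, List.mem_cons]
    · by_cases hgh : g = h
      · subst hgh
        simp [hg, hstep g, List.mem_cons]
      · simp [hg, hstep g, hgh, List.mem_cons]

lemma getD_counterOr_counter (a : PySem.Dict (List String) Int) (ys : List (List String))
    (g : List String) (ha : 0 ≤ a.getD g 0) :
    (pyCounterOr a (PySem.Dict.counter ys)).getD g 0
      = max (a.getD g 0) (List.count g ys : Int) := by
  unfold pyCounterOr
  rw [PySem.Dict.items_counter, List.foldl_map]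
  rw [foldl_maxinsert _ (PySem.Set.nodup_ofList _) (fun kk => (List.count kk ys : Int)) a g]
  by_cases hg : g ∈ PySem.Set.ofList ys
  · simp [hg]
  · have : g ∉ ys := fun h => hg ((PySem.Set.mem_ofList _ _).mpr h)
    rw [List.count_eq_zero.mpr this]
    simp [hg]; omega

lemma getD_mergedA (references : List (List String)) (M : Int) (g : List String) :
    (mergedA references M).getD g 0
      = references.foldl (fun v r => max v ((List.count g (flatG r M)) : Int)) 0 := by
  unfold mergedA
  have key : ∀ (refs : List (List String)) (m : PySem.Dict (List String) Int),
      0 ≤ m.getD g 0 →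
      (refs.foldl (fun m r => pyCounterOr m (pyGetNgramsA r M)) m).getD g 0
        = refs.foldl (fun v r => max v ((List.count g (flatG r M)) : Int)) (m.getD g 0) := by
    intro refs
    induction refs with
    | nil => intro m _; rfl
    | cons r refs ih =>
      intro m hm
      simp only [List.foldl_cons]
      rw [show pyCounterOr m (pyGetNgramsA r M)
            = pyCounterOr m (PySem.Dict.counter (flatG r M)) by rw [ngramsA_eq_counter]]
      rw [ih _ (by rw [getD_counterOr_counter _ _ _ hm]; exact le_trans hm (le_max_left _ _))]
      rw [getD_counterOr_counter _ _ _ hm]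
  rw [key references PySem.Dict.empty (by simp [PySem.Dict.getD_empty])]
  simp [PySem.Dict.getD_empty]

lemma mergedA_nonneg (references : List (List String)) (M : Int) (g : List String) :
    0 ≤ (mergedA references M).getD g 0 := by
  rw [getD_mergedA, ← List.foldl_map (f := fun r => ((List.count g (flatG r M)) : Int)) (g := max)]
  exact (PySem.List.le_foldl_max _ _).1

lemma foldl_max_int (l : List Int) (a b : Int) :
    l.foldl max (max a b) = max a (l.foldl max b) := by
  induction l generalizing b with
  | nil => rfl
  | cons x l ih => simp only [List.foldl_cons, max_assoc]; exact ih _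

lemma max?_id_getD_nonneg (xs : List Int) (h : ∀ x ∈ xs, 0 ≤ x) :
    (PySem.List.max? xs (fun x => x)).getD 0 = xs.foldl max 0 := by
  cases xs with
  | nil => rfl
  | cons x l =>
    rw [PySem.List.max?_id_cons, Option.getD_some, List.foldl_cons, foldl_max_int]
    have hx : 0 ≤ x := h x (by simp)
    have : x ≤ l.foldl max x := (PySem.List.le_foldl_max l x).1
    omega

lemma counterAnd_items (gs : List (List String)) (b : PySem.Dict (List String) Int) :
    (pyCounterAnd (PySem.Dict.counter gs) b).items
      = ((PySem.Set.ofList gs).filter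
            (fun kk => decide (0 < min ((List.count kk gs : Int)) (b.getD kk 0)))).map
          (fun kk => (kk, min ((List.count kk gs : Int)) (b.getD kk 0))) := by
  unfold pyCounterAnd
  rw [PySem.Dict.items_counter, List.foldl_map]
  simp only [gt_iff_lt]
  simp only [PySem.List.foldl_ite_eq_foldl_filter
        (p := fun kk => 0 < min ((List.count kk gs : Int)) (b.getD kk 0))
        (f := fun (d : PySem.Dict (List String) Int) kk => d.insert kk (min ((List.count kk gs : Int)) (b.getD kk 0)))]
  rw [PySem.Dict.items_foldl_insert_fresh _ (fun a => a)
        (fun kk => min ((List.count kk gs : Int)) (b.getD kk 0)) _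
        (fun a _ => PySem.Dict.contains_empty a)
        (by simpa using ((PySem.Set.nodup_ofList gs).filter _))]
  simp [PySem.Dict.empty]

lemma foldl_setAdd (L : List ((List String) × Int)) (j : Nat) (ms : List Int) :
    L.foldl (fun ms q => ms.set j (ms.getD j 0 + q.2)) ms
      = ms.set j (ms.getD j 0 + (L.map Prod.snd).sum) := by
  by_cases hj : j < ms.length
  · induction L generalizing ms with
    | nil =>
      simp only [List.foldl_nil, List.map_nil, List.sum_nil, add_zero]
      rw [List.getD_eq_getElem?_getD, List.getElem?_eq_getElem hj]
      simp
    | cons q L ih =>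
      simp only [List.foldl_cons, List.map_cons, List.sum_cons]
      rw [ih _ (by simpa using hj), List.set_set]
      congr 1
      simp only [List.getD_eq_getElem?_getD, List.getElem?_set_self hj, Option.getD_some]
      omega
  · have hle : ms.length ≤ j := by omega
    rw [List.set_eq_of_length_le hle]
    induction L with
    | nil => rfl
    | cons q L ih => simp only [List.foldl_cons, List.set_eq_of_length_le hle]; exact ih

lemma sum_filter_pos (s : List (List String)) (f : List String → Int)
    (h : ∀ g ∈ s, 0 ≤ f g) :
    ((s.filter (fun g => decide (0 < f g))).map f).sum = (s.map f).sum := by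
  induction s with
  | nil => rfl
  | cons x s ih =>
    have hx := h x (by simp)
    by_cases hp : 0 < f x
    · simp only [List.filter_cons, hp, decide_true, if_true, List.map_cons, List.sum_cons]
      rw [ih (fun g hg => h g (by simp [hg]))]
    · simp only [List.filter_cons, hp, decide_false, Bool.false_eq_true, if_false, List.map_cons, List.sum_cons]
      rw [ih (fun g hg => h g (by simp [hg]))]
      omega

lemma flatMap_filter_map (l : List Int) (B : Int → List (List String))
    (q : List String → Bool) (h : List String → (List String) × Int) :
    ((l.flatMap B).filter (fun g => q g)).map h
      = l.flatMap (fun k => ((B k).filter (fun g => q g)).map h) := by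
  induction l with
  | nil => rfl
  | cons k l ih =>
    simp only [List.flatMap_cons, List.filter_append, List.map_append, ih]

lemma foldl_flatMap {α β : Type} (l : List Int) (F : Int → List α) (f : β → α → β) (init : β) :
    (l.flatMap F).foldl f init = l.foldl (fun acc k => (F k).foldl f acc) init := by
  rw [List.flatMap_def, List.foldl_flatten, List.foldl_map]

lemma zipIdx_firstOcc (tg : List (List String)) :
    ((tg.zipIdx.filter (fun p => decide (p.1 ∉ tg.take p.2))).map Prod.fst)
      = PySem.Set.ofList tg := by
  induction tg using List.reverseRecOn with
  | nil => rfl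
  | append_singleton l x ih =>
    rw [List.zipIdx_append, List.filter_append, List.map_append]
    have h1 : (l.zipIdx.filter (fun p => decide (p.1 ∉ (l ++ [x]).take p.2)))
        = (l.zipIdx.filter (fun p => decide (p.1 ∉ l.take p.2))) := by
      apply List.filter_congr
      intro p hp
      obtain ⟨hk, hlt, -⟩ := List.mem_zipIdx hp
      rw [List.take_append_of_le_length (by omega)]
    have h2 : ([x].zipIdx (0 + l.length)).filter (fun p => decide (p.1 ∉ (l ++ [x]).take p.2))
        = if x ∈ l then [] else [(x, l.length)] := by
      simp only [List.zipIdx, List.filter_cons, List.filter_nil]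
      rw [show (0 + l.length) = l.length by omega]
      rw [List.take_left]
      by_cases hx : x ∈ l <;> simp [hx]
    rw [h1, ih, h2, PySem.Set.ofList_append_singleton, PySem.Set.add_eq_ite]
    by_cases hx : x ∈ l
    · simp [hx, PySem.Set.mem_ofList]
    · simp [hx, PySem.Set.mem_ofList]

lemma clipped_eq_sum (references : List (List String)) (translation : List String) (k : Int) :
    pyClippedMatches references translation k
      = ((PySem.Set.ofList (pyOrderNgrams translation k)).map
          (fun g => min ((List.count g (pyOrderNgrams translation k)) : Int)
            ((PySem.List.max? ((references.map (fun r => pyOrderNgrams r k)).map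
                (fun rg => ((List.count g rg) : Int))) (fun x => x)).getD 0))).sum := by
  unfold pyClippedMatches
  set tg := pyOrderNgrams translation k with htg
  set w : List String → Int := fun g =>
    min ((List.count g tg) : Int)
      ((PySem.List.max? ((references.map (fun r => pyOrderNgrams r k)).map
          (fun rg => ((List.count g rg) : Int))) (fun x => x)).getD 0) with hw
  have hbody : tg.zipIdx.foldl (fun total p =>
      if p.1 ∈ PySem.List.slice tg none (some (p.2 : Int)) then total
      else total + min ((PySem.List.count tg p.1 : Int))
        ((PySem.List.max? ((references.map (fun r => pyOrderNgrams r k)).map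
            (fun rg => (PySem.List.count rg p.1 : Int))) (fun x => x)).getD 0)) 0
      = tg.zipIdx.foldl (fun total p =>
          if p.1 ∉ tg.take p.2 then total + w p.1 else total) 0 := by
    apply PySem.List.foldl_congr_mem
    intro acc p hp
    rw [PySem.List.slice_to_natCast]
    simp only [PySem.List.count, hw]
    by_cases hm : p.1 ∈ tg.take p.2 <;> simp [hm]
  rw [hbody]
  rw [PySem.List.foldl_ite_eq_foldl_filter (p := fun p : (List String) × Nat => p.1 ∉ tg.take p.2)
      (f := fun (total : Int) (p : (List String) × Nat) => total + w p.1)]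
  rw [PySem.List.foldl_add (List.filter (fun x => decide (x.1 ∉ List.take x.2 tg)) tg.zipIdx)
      (fun p : (List String) × Nat => w p.1) 0]
  rw [show (fun p : (List String) × Nat => w p.1) = w ∘ Prod.fst from rfl, ← List.map_map]
  rw [zipIdx_firstOcc]
  simp

-- per-order bridge: A's per-block clipped sum is B's _clipped_matches
lemma block_sum_eq_clipped (references : List (List String)) (translation : List String)
    {k M : Int} (hk1 : 1 ≤ k) (hkM : k ≤ M) :
    ((PySem.Set.ofList (pyOrderNgrams translation k)).map
        (fun g => min ((List.count g (flatG translation M)) : Int)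
          ((mergedA references M).getD g 0))).sum
      = pyClippedMatches references translation k := by
  rw [clipped_eq_sum]
  apply congrArg
  apply List.map_congr_left
  intro g hg
  have hglen : g.length = k.toNat :=
    mem_orderNgrams_length hk1 ((PySem.Set.mem_ofList _ _).mp hg)
  rw [count_flatG hk1 hkM hglen]
  congr 1
  rw [getD_mergedA]
  rw [max?_id_getD_nonneg _ (by
    intro x hx
    simp only [List.map_map, List.mem_map, Function.comp] at hx
    obtain ⟨r, -, rfl⟩ := hx
    exact Int.natCast_nonneg _)]
  rw [List.map_map, List.foldl_map]
  apply PySem.List.foldl_congr_mem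
  intro acc r _
  simp only [Function.comp]
  rw [count_flatG hk1 hkM hglen]

-- A's overlap scatter loop equals B's per-order matches loop
lemma matchesA_eq (references : List (List String)) (translation : List String) (M : Int)
    (st1 : List Int) :
    (pyCounterAnd (pyGetNgramsA translation M) (mergedA references M)).items.foldl
        (fun ms q => ms.set (q.1.length - 1)
          (ms.getD (q.1.length - 1) 0
            + (pyCounterAnd (pyGetNgramsA translation M) (mergedA references M)).getD q.1 0)) st1
      = (PySem.List.pyRange 1 (M + 1) 1).foldl
          (fun ms order => ms.set (order - 1).toNat
            (ms.getD (order - 1).toNat 0 + pyClippedMatches references translation order)) st1 := by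
  set b := mergedA references M with hb
  set gs := flatG translation M with hgs
  set nf : List String → Int := fun kk => min ((List.count kk gs : Int)) (b.getD kk 0) with hnf
  set ov := pyCounterAnd (pyGetNgramsA translation M) b with hov
  have hitems : ov.items
      = ((PySem.Set.ofList gs).filter (fun kk => decide (0 < nf kk))).map (fun kk => (kk, nf kk)) := by
    rw [hov, ngramsA_eq_counter, counterAnd_items]
  have hkeys : ov.keys.Nodup := by
    have : ov.keys = (PySem.Set.ofList gs).filter (fun kk => decide (0 < nf kk)) := by
      simp only [PySem.Dict.keys, hitems, List.map_map]
      have hc : (Prod.fst ∘ fun kk => (kk, nf kk)) = id := rfl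
      rw [hc, List.map_id]
    rw [this]
    exact (PySem.Set.nodup_ofList gs).filter _
  have hgetD : ∀ q ∈ ov.items, ov.getD q.1 0 = q.2 := by
    intro q hq
    exact PySem.Dict.getD_of_mem_items ov (by simpa using hq) hkeys 0
  rw [PySem.List.foldl_congr_mem ov.items _
      (fun ms q => ms.set (q.1.length - 1) (ms.getD (q.1.length - 1) 0 + q.2)) st1
      (fun acc q hq => by rw [hgetD q hq])]
  rw [hitems, ofList_flatG, flatMap_filter_map, foldl_flatMap]
  apply PySem.List.foldl_congr_mem
  intro ms k hkmem
  rw [PySem.List.mem_pyRange_one] at hkmem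
  obtain ⟨hk1, hkM'⟩ := hkmem
  have hkM : k ≤ M := by omega
  -- entries of block k all have n-gram length k
  rw [PySem.List.foldl_congr_mem _ _
      (fun (ms : List Int) (q : (List String) × Int) =>
        ms.set (k.toNat - 1) (ms.getD (k.toNat - 1) 0 + q.2)) ms
      (fun acc q hq => by
        obtain ⟨g, hgf, rfl⟩ := List.mem_map.mp hq
        have hgmem : g ∈ PySem.Set.ofList (pyOrderNgrams translation k) := List.mem_of_mem_filter hgf
        have : g.length = k.toNat :=
          mem_orderNgrams_length hk1 ((PySem.Set.mem_ofList _ _).mp hgmem)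
        simp [this])]
  rw [foldl_setAdd, List.map_map]
  have hmapsnd : (Prod.snd ∘ fun kk => (kk, nf kk)) = nf := rfl
  rw [hmapsnd]
  have hnonneg : ∀ g ∈ PySem.Set.ofList (pyOrderNgrams translation k), 0 ≤ nf g := by
    intro g _
    have h1 : (0:Int) ≤ (List.count g gs : Int) := by positivity
    have h2 := mergedA_nonneg references M g
    rw [hnf]; simp only []
    rw [hb] at *
    omega
  rw [sum_filter_pos _ _ hnonneg]
  rw [hnf, hb, hgs]
  rw [block_sum_eq_clipped references translation hk1 hkM]
  have hidx : (k - 1).toNat = k.toNat - 1 := by omega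
  rw [hidx]

-- ===== VERDICT (by name: the statement is the Claim_ definition above) =====
theorem get_ngrams_matches_spec : Claim_equal_get_ngrams_matches := by
  intro reference_corpus translation_corpus config _ _
  unfold Spec_get_ngrams_matches
  unfold get_ngrams_matches get_ngrams_matches_alt
  apply PySem.List.foldl_congr_mem
  intro st p _
  simp only []
  have hsplit := PySem.List.foldl_prod_mk
      (fun (ms : List Int) (order : Int) => ms.set (order - 1).toNat
        (ms.getD (order - 1).toNat 0 + pyClippedMatches p.1 p.2 order))
      (fun (ps : List Int) (order : Int) =>
        if PySem.List.len p.2 - order + 1 > 0 then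
          ps.set (order - 1).toNat (ps.getD (order - 1).toNat 0 + (PySem.List.len p.2 - order + 1))
        else ps)
      (PySem.List.pyRange 1 ((PySem.Dict.mk config).getD "max_order_ngrams" 0 + 1) 1) st.1 st.2.1
  rw [hsplit]
  rw [mergedA_def, matchesA_eq]
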